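-- pv_equiv track=rewrite | github.com/arthurhenrique/iso-8583 | Pyso8583/parser_tlv.py | has_another_byte
-- ===== SOURCE A (Python) =====
-- BIT_5 = 5
--
-- BIT_0 = 0
--
-- def has_another_byte(tag_byte):
--     sum_bits = 0
--     for bit in range(BIT_0,BIT_5):
--         if tag_byte & 1 << bit:
--             sum_bits = sum_bits + 1
--     # has another byte?
--     if sum_bits == 5:
--         return True
--     else:
--         return False
-- ===== SOURCE B (Python) =====
-- def has_another_byte(tag_byte):
--     return (tag_byte & 0x1F) == 0x1F
-- ===== Notes on version B (the rewrite author's own statement) =====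
-- stated objective: simpler
-- what changed: Replaced the per-bit counting loop (shift, test, increment, final full-count check) with a single closed-form mask test (tag_byte & 0x1F) == 0x1F.
import Mathlib
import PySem

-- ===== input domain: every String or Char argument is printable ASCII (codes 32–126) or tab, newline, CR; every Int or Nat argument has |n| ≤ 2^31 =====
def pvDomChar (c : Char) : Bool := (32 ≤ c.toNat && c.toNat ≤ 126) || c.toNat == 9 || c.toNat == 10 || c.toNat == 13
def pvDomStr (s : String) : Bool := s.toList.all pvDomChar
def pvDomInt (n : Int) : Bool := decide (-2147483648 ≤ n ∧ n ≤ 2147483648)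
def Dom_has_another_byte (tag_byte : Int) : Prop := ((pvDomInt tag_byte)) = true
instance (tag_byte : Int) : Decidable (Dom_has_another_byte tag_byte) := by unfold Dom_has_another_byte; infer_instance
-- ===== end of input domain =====

-- B replaces A's 5-iteration per-bit counting loop by a single closed-form mask test (tag_byte & 0x1F) == 0x1F (simpler).

-- ===== PORT A =====
def BIT_5 : Int := 5
def BIT_0 : Int := 0

-- `1 << bit` is ported as `(1 : Int) <<< bit.toNat`; exact here since every `bit` drawn
-- from range(BIT_0, BIT_5) is nonnegative.
def has_another_byte (tag_byte : Int) : Bool :=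
  let sum_bits : Int :=
    (PySem.List.pyRange BIT_0 BIT_5 1).foldl
      (fun sum_bits bit =>
        if PySem.Int.band tag_byte ((1 : Int) <<< bit.toNat) ≠ 0 then sum_bits + 1 else sum_bits) 0
  if sum_bits == 5 then true else false

-- ===== PORT B =====
def has_another_byte_alt (tag_byte : Int) : Bool :=
  PySem.Int.band tag_byte 0x1F == 0x1F

-- ===== PRECONDITION & SPEC =====
def Spec_has_another_byte (tag_byte : Int) (out : Bool) : Prop := out = has_another_byte_alt tag_byte
instance (tag_byte : Int) (out : Bool) : Decidable (Spec_has_another_byte tag_byte out) := by unfold Spec_has_another_byte; infer_instance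

-- ===== CLAIM (what is proved, stated in full; the proofs are below) =====
def Claim_equal_has_another_byte : Prop := ∀ (tag_byte : Int), Dom_has_another_byte tag_byte → Spec_has_another_byte tag_byte (has_another_byte tag_byte)

-- ===== LEMMAS AND PROOFS =====

-- a Nat `&&&` with a mask below 32 on the right only sees the left argument's low 5 bits
theorem nat_and_low (m c : Nat) (hc : c < 32) : m &&& c = (m % 32) &&& c := by
  apply Nat.eq_of_testBit_eq
  intro j
  rcases Nat.lt_or_ge j 5 with h | h
  · simp only [Nat.testBit_and]
    rw [show (32 : Nat) = 2 ^ 5 from by norm_num, Nat.testBit_mod_two_pow]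
    simp [h]
  · have hcf : c.testBit j = false := by
      apply Nat.testBit_lt_two_pow
      calc c < 32 := hc
        _ = 2 ^ 5 := by norm_num
        _ ≤ 2 ^ j := Nat.pow_le_pow_right (by norm_num) h
    simp [Nat.testBit_and, hcf]

-- same, mask on the left
theorem nat_and_low' (c m : Nat) (hc : c < 32) : c &&& m = c &&& (m % 32) := by
  rw [Nat.land_comm, nat_and_low m c hc, Nat.land_comm]

theorem key (n : Int) : has_another_byte n = has_another_byte_alt n := by
  have hr : PySem.List.pyRange BIT_0 BIT_5 1 = [0, 1, 2, 3, 4] := by decide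
  unfold has_another_byte has_another_byte_alt
  rw [hr]
  simp only [List.foldl]
  simp only [show ((1:Int) <<< (((0:Int).toNat : Nat) : Int)) = 1 from by decide,
             show ((1:Int) <<< (((1:Int).toNat : Nat) : Int)) = 2 from by decide,
             show ((1:Int) <<< (((2:Int).toNat : Nat) : Int)) = 4 from by decide,
             show ((1:Int) <<< (((3:Int).toNat : Nat) : Int)) = 8 from by decide,
             show ((1:Int) <<< (((4:Int).toNat : Nat) : Int)) = 16 from by decide]
  have c1 : (0:Int) ≤ 1 := by norm_num
  have c2 : (0:Int) ≤ 2 := by norm_num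
  have c4 : (0:Int) ≤ 4 := by norm_num
  have c8 : (0:Int) ≤ 8 := by norm_num
  have c16 : (0:Int) ≤ 16 := by norm_num
  have c31 : (0:Int) ≤ 31 := by norm_num
  by_cases hn : 0 ≤ n
  · simp only [PySem.Int.band.eq_1, hn, c1, c2, c4, c8, c16, c31, if_true,
               Int.toNat_one, show Int.toNat 2 = 2 from rfl, show Int.toNat 4 = 4 from rfl,
               show Int.toNat 8 = 8 from rfl, show Int.toNat 16 = 16 from rfl,
               show Int.toNat 31 = 31 from rfl]
    rw [nat_and_low n.toNat 1 (by norm_num), nat_and_low n.toNat 2 (by norm_num),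
        nat_and_low n.toNat 4 (by norm_num), nat_and_low n.toNat 8 (by norm_num),
        nat_and_low n.toNat 16 (by norm_num), nat_and_low n.toNat 31 (by norm_num)]
    have hlt : n.toNat % 32 < 32 := Nat.mod_lt _ (by norm_num)
    revert hlt
    generalize n.toNat % 32 = r
    intro hlt
    interval_cases r <;> decide
  · simp only [PySem.Int.band.eq_1, hn, c1, c2, c4, c8, c16, c31, if_true, if_false,
               Int.toNat_one, show Int.toNat 2 = 2 from rfl, show Int.toNat 4 = 4 from rfl,
               show Int.toNat 8 = 8 from rfl, show Int.toNat 16 = 16 from rfl,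
               show Int.toNat 31 = 31 from rfl]
    rw [nat_and_low' 1 (-n-1).toNat (by norm_num), nat_and_low' 2 (-n-1).toNat (by norm_num),
        nat_and_low' 4 (-n-1).toNat (by norm_num), nat_and_low' 8 (-n-1).toNat (by norm_num),
        nat_and_low' 16 (-n-1).toNat (by norm_num), nat_and_low' 31 (-n-1).toNat (by norm_num)]
    have hlt : (-n-1).toNat % 32 < 32 := Nat.mod_lt _ (by norm_num)
    revert hlt
    generalize (-n-1).toNat % 32 = r
    intro hlt
    interval_cases r <;> decide

-- ===== VERDICT (by name: the statement is the Claim_ definition above) =====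
theorem has_another_byte_spec : Claim_equal_has_another_byte := by
  intro n _
  unfold Spec_has_another_byte
  exact key n
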